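-- pv_equiv track=rewrite | github.com/Rxyalxrd/algorithms-and-data-structures | Stones_from_Mars.py | solution
-- ===== SOURCE A (Python) =====
-- def solution(orders, orders_list, samples, samples_list):
--     count = 0
--
--     orders_list.sort()
--     samples_list.sort()
--
--     len_samples = len(samples_list)
--     len_orders = len(orders_list)
--
--     ptr_order = 0
--     ptr_sample = 0
--
--     while ptr_order < len_orders and ptr_sample < len_samples:
--         if orders_list[ptr_order] <= samples_list[ptr_sample]:
--             count += 1
--             ptr_order += 1
--         ptr_sample += 1
--
--     return count
-- ===== SOURCE B (Python) =====
-- def solution(orders, orders_list, samples, samples_list):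
--     orders_list.sort()
--     samples_list.sort()
--
--     n = len(orders_list)
--     m = len(samples_list)
--
--     def feasible(k):
--         # the k smallest orders can each be served by one of the k largest samples
--         for i in range(k):
--             if orders_list[i] > samples_list[m - k + i]:
--                 return False
--         return True
--
--     lo, hi = 0, min(n, m)
--     while lo < hi:
--         mid = (lo + hi + 1) // 2
--         if feasible(mid):
--             lo = mid
--         else:
--             hi = mid - 1
--     return lo
-- ===== Notes on version B (the rewrite author's own statement) =====
-- stated objective: alternative
-- what changed: B replaces A's linear two-pointer greedy scan by a binary search on the answer k with a Hall-style feasibility check (the k smallest orders fit the k largest samples pointwise), proved equal to the greedy match count.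
import Mathlib
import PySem

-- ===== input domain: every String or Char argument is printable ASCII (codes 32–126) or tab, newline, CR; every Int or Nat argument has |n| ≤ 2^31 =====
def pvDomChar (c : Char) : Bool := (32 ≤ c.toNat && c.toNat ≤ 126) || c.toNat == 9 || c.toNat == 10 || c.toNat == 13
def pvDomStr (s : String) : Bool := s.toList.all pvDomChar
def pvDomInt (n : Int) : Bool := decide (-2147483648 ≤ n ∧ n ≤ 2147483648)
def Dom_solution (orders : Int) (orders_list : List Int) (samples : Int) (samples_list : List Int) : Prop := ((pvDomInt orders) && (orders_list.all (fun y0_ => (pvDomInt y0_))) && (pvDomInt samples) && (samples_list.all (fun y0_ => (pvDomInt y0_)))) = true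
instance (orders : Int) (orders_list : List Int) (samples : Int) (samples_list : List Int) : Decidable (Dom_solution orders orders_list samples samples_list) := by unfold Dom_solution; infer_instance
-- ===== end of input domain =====

-- B replaces A's two-pointer greedy scan by a binary search on the answer k, checking the
-- Hall-style feasibility condition "the k smallest orders fit the k largest samples pointwise"
-- (objective: alternative). Both Pythons sort their two list arguments in place; the
-- equivalence proved here is about the return value (B performs the same in-place sorts).

-- ===== PORT A =====
-- A's while loop: ptr_order/ptr_sample walk the sorted lists; indexing is always in range
-- (guarded by the loop condition), so List.getD is exact here.
def loopA (os ss : List Int) (lo ls i j : Nat) (count : Int) : Int :=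
  if _h : i < lo ∧ j < ls then
    if os.getD i 0 ≤ ss.getD j 0 then loopA os ss lo ls (i + 1) (j + 1) (count + 1)
    else loopA os ss lo ls i (j + 1) count
  else count
termination_by ls - j
decreasing_by all_goals omega

def solution (orders : Int) (orders_list : List Int) (samples : Int) (samples_list : List Int) : Int :=
  let os := PySem.List.sorted orders_list (fun x => x) false
  let ss := PySem.List.sorted samples_list (fun x => x) false
  loopA os ss os.length ss.length 0 0 0

-- ===== PORT B =====
-- B's feasible(k): the early-exit for-loop over range(k) is an all-check (indexing is in
-- range for every call B makes, since k ≤ min(n, m), so List.getD is exact here).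
def feasB (os ss : List Int) (m k : Nat) : Bool :=
  (List.range k).all (fun i => os.getD i 0 ≤ ss.getD (m - k + i) 0)

-- B's binary search on the answer: lo/hi as in Source B, mid = (lo+hi+1)//2.
def bsearchB (os ss : List Int) (m : Nat) (lo hi : Nat) : Nat :=
  if _h : lo < hi then
    let mid := (lo + hi + 1) / 2
    if feasB os ss m mid then bsearchB os ss m mid hi
    else bsearchB os ss m lo (mid - 1)
  else lo
termination_by hi - lo
decreasing_by all_goals omega

def solution_alt (orders : Int) (orders_list : List Int) (samples : Int) (samples_list : List Int) : Int :=
  let os := PySem.List.sorted orders_list (fun x => x) false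
  let ss := PySem.List.sorted samples_list (fun x => x) false
  Int.ofNat (bsearchB os ss ss.length 0 (min os.length ss.length))

-- ===== PRECONDITION & SPEC =====
def Spec_solution (orders : Int) (orders_list : List Int) (samples : Int) (samples_list : List Int) (out : Int) : Prop := out = solution_alt orders orders_list samples samples_list
instance (orders : Int) (orders_list : List Int) (samples : Int) (samples_list : List Int) (out : Int) : Decidable (Spec_solution orders orders_list samples samples_list out) := by unfold Spec_solution; infer_instance

-- ===== CLAIM (what is proved, stated in full; the proofs are below) =====
def Claim_equal_solution : Prop := ∀ (orders : Int) (orders_list : List Int) (samples : Int) (samples_list : List Int), Dom_solution orders orders_list samples samples_list → Spec_solution orders orders_list samples samples_list (solution orders orders_list samples samples_list)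

-- ===== LEMMAS AND PROOFS =====

-- Abstract list-level version of A's scan (match count as a Nat).
def gA : List Int → List Int → Nat
  | _, [] => 0
  | [], _ :: _ => 0
  | o :: os, s :: ss => if o ≤ s then gA os ss + 1 else gA (o :: os) ss
termination_by os ss => os.length + ss.length

theorem loopA_eq_gA (os ss : List Int) :
    ∀ j i c, loopA os ss os.length ss.length i j c = c + (gA (os.drop i) (ss.drop j) : Int) := by
  have key : ∀ k j i c, ss.length - j ≤ k →
      loopA os ss os.length ss.length i j c = c + (gA (os.drop i) (ss.drop j) : Int) := by
    intro k
    induction k with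
    | zero =>
      intro j i c hk
      have hj : ¬ j < ss.length := by omega
      rw [loopA]
      have hd : ss.drop j = [] := List.drop_eq_nil_of_le (by omega)
      simp only [hj, and_false, dite_false, hd]
      cases os.drop i with
      | nil => simp [gA]
      | cons a t => simp [gA]
    | succ k IH =>
      intro j i c _hk
      rw [loopA]
      by_cases hj : j < ss.length
      · have hdj := List.drop_eq_getElem_cons hj
        by_cases hi : i < os.length
        · have hdi := List.drop_eq_getElem_cons hi
          simp only [hi, hj, and_self, dite_true]
          have hgo : os.getD i 0 = os[i] := List.getD_eq_getElem os 0 hi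
          have hgs : ss.getD j 0 = ss[j] := List.getD_eq_getElem ss 0 hj
          rw [hgo, hgs, hdi, hdj]
          by_cases hle : os[i] ≤ ss[j]
          · simp only [hle, if_true, gA]
            rw [IH (j + 1) (i + 1) (c + 1) (by omega)]
            push_cast
            ring
          · simp only [hle, if_false, gA]
            rw [IH (j + 1) i c (by omega), hdi]
        · have : os.drop i = [] := List.drop_eq_nil_of_le (by omega)
          simp only [hi, false_and, dite_false, this, hdj, gA]
          simp
      · have hd : ss.drop j = [] := List.drop_eq_nil_of_le (by omega)
        simp only [hj, and_false, dite_false, hd]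
        cases os.drop i with
        | nil => simp [gA]
        | cons a t => simp [gA]
  intro j i c
  exact key (ss.length - j) j i c le_rfl

theorem gA_le (os ss : List Int) : gA os ss ≤ os.length ∧ gA os ss ≤ ss.length := by
  induction os, ss using gA.induct with
  | case1 os => simp [gA]
  | case2 s ss => simp [gA]
  | case3 o os s ss hle IH =>
    simp only [gA, if_pos hle, List.length_cons]
    omega
  | case4 o os s ss hle IH =>
    simp only [List.length_cons] at IH
    simp only [gA, if_neg hle, List.length_cons]
    omega

-- Hall-style feasibility as a Prop: the k smallest orders fit the k largest samples pointwise.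
def Feas (os ss : List Int) (k : Nat) : Prop :=
  List.Forall₂ (· ≤ ·) (os.take k) (ss.drop (ss.length - k))

-- A's greedy count is feasible (samples list sorted).
theorem gA_feas (os ss : List Int) (hss : ss.Pairwise (· ≤ ·)) : Feas os ss (gA os ss) := by
  induction os, ss using gA.induct with
  | case1 os => simp [gA, Feas]
  | case2 s ss => simp [gA, Feas]
  | case3 o os s ss hle IH =>
    have hss' : ss.Pairwise (· ≤ ·) := hss.tail
    have hsmin : ∀ x ∈ ss, s ≤ x := fun x hx => (List.pairwise_cons.mp hss).1 x hx
    have hb := gA_le os ss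
    have IH' := IH hss'
    simp only [gA, if_pos hle, Feas, List.length_cons, List.take_succ_cons]
    by_cases hk : gA os ss = ss.length
    · have h0 : ss.length + 1 - (gA os ss + 1) = 0 := by omega
      rw [h0, List.drop_zero]
      refine List.Forall₂.cons hle ?_
      have := IH'
      have h0' : ss.length - gA os ss = 0 := by omega
      rw [Feas, h0', List.drop_zero] at this
      exact this
    · have hlt : gA os ss < ss.length := by omega
      have h1 : ss.length + 1 - (gA os ss + 1) = ss.length - gA os ss := by omega
      have h2 : ss.length - gA os ss ≥ 1 := by omega
      rw [h1]
      have hdrop : (s :: ss).drop (ss.length - gA os ss)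
          = ss.drop (ss.length - gA os ss - 1) := by
        cases hh : ss.length - gA os ss with
        | zero => omega
        | succ t => rw [List.drop_succ_cons]; simp
      rw [hdrop]
      have hidx : ss.length - gA os ss - 1 < ss.length := by omega
      have hcons := List.drop_eq_getElem_cons hidx
      have h3 : ss.length - gA os ss - 1 + 1 = ss.length - gA os ss := by omega
      rw [hcons, h3]
      refine List.Forall₂.cons ?_ IH'
      exact le_trans hle (hsmin _ (List.getElem_mem hidx))
  | case4 o os s ss hle IH =>
    have hss' : ss.Pairwise (· ≤ ·) := hss.tail
    have hb := gA_le (o :: os) ss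
    have IH' := IH hss'
    simp only [gA, if_neg hle, Feas, List.length_cons]
    have h1 : ss.length + 1 - gA (o :: os) ss = (ss.length - gA (o :: os) ss) + 1 := by omega
    rw [h1, List.drop_succ_cons]
    exact IH'

-- Any feasible k is at most A's greedy count (no sortedness needed).
theorem feas_le_gA (os ss : List Int) :
    ∀ k, k ≤ os.length → k ≤ ss.length → Feas os ss k → k ≤ gA os ss := by
  induction os, ss using gA.induct with
  | case1 os =>
    intro k _ hk _
    have : k = 0 := by simpa using hk
    omega
  | case2 s ss =>
    intro k hk _ _
    have : k = 0 := by simpa using hk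
    omega
  | case3 o os s ss hle IH =>
    intro k hk1 hk2 hf
    cases k with
    | zero => omega
    | succ k' =>
      simp only [gA, if_pos hle]
      have hk2' : k' ≤ ss.length := by simpa using hk2
      suffices h : k' ≤ gA os ss by omega
      apply IH k' (by simpa using hk1) hk2'
      rw [Feas] at hf ⊢
      simp only [List.length_cons, List.take_succ_cons] at hf
      by_cases hk'' : k' = ss.length
      · have h0 : ss.length + 1 - (k' + 1) = 0 := by omega
        rw [h0, List.drop_zero] at hf
        rcases hf with _ | ⟨_, htail⟩
        have h0' : ss.length - k' = 0 := by omega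
        rw [h0', List.drop_zero]
        exact htail
      · have hlt : k' < ss.length := by omega
        have h1 : ss.length + 1 - (k' + 1) = ss.length - k' := by omega
        rw [h1] at hf
        have hdrop : (s :: ss).drop (ss.length - k') = ss.drop (ss.length - k' - 1) := by
          cases hh : ss.length - k' with
          | zero => omega
          | succ t => rw [List.drop_succ_cons]; simp
        rw [hdrop] at hf
        have hidx : ss.length - k' - 1 < ss.length := by omega
        have hcons := List.drop_eq_getElem_cons hidx
        have h3 : ss.length - k' - 1 + 1 = ss.length - k' := by omega
        rw [hcons, h3] at hf
        rcases hf with _ | ⟨_, htail⟩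
        exact htail
  | case4 o os s ss hle IH =>
    intro k hk1 hk2 hf
    simp only [List.length_cons] at hk2
    simp only [gA, if_neg hle]
    rw [Feas, List.length_cons] at hf
    by_cases hk'' : k = ss.length + 1
    · exfalso
      have h0 : ss.length + 1 - k = 0 := by omega
      rw [h0, List.drop_zero] at hf
      have hk1' : 1 ≤ k := by omega
      rcases hkc : k with _ | k'
      · omega
      · rw [hkc, List.take_succ_cons] at hf
        rcases hf with _ | ⟨hh, _⟩
        exact hle hh
    · have hk2' : k ≤ ss.length := by omega
      apply IH k hk1 hk2'
      rw [Feas]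
      have h1 : ss.length + 1 - k = (ss.length - k) + 1 := by omega
      rw [h1, List.drop_succ_cons] at hf
      exact hf

-- Feasibility in indexed (getD) form; this is exactly what B's feasible(k) checks.
theorem Feas_iff_getD (os ss : List Int) (k : Nat) (hk1 : k ≤ os.length) (hk2 : k ≤ ss.length) :
    Feas os ss k ↔ ∀ i < k, os.getD i 0 ≤ ss.getD (ss.length - k + i) 0 := by
  rw [Feas, List.forall₂_iff_get]
  have hlt : (os.take k).length = k := by simp [Nat.min_eq_left hk1]
  have hld : (ss.drop (ss.length - k)).length = k := by simp; omega
  constructor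
  · rintro ⟨-, h⟩ i hi
    have h1 : i < (os.take k).length := by omega
    have h2 : i < (ss.drop (ss.length - k)).length := by omega
    have := h i h1 h2
    simp only [List.get_eq_getElem, List.getElem_take, List.getElem_drop] at this
    have hio : i < os.length := by omega
    have his : ss.length - k + i < ss.length := by omega
    rw [List.getD_eq_getElem os 0 hio, List.getD_eq_getElem ss 0 his]
    exact this
  · intro h
    refine ⟨by omega, ?_⟩
    intro i h1 h2
    have hik : i < k := by omega
    have := h i hik
    have hio : i < os.length := by omega
    have his : ss.length - k + i < ss.length := by omega
    rw [List.getD_eq_getElem os 0 hio, List.getD_eq_getElem ss 0 his] at this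
    simp only [List.get_eq_getElem, List.getElem_take, List.getElem_drop]
    exact this

theorem feasB_iff (os ss : List Int) (k : Nat) (hk1 : k ≤ os.length) (hk2 : k ≤ ss.length) :
    feasB os ss ss.length k = true ↔ Feas os ss k := by
  rw [feasB, List.all_eq_true, Feas_iff_getD os ss k hk1 hk2]
  constructor
  · intro h i hi
    have := h i (List.mem_range.mpr hi)
    exact of_decide_eq_true this
  · intro h i hi
    exact decide_eq_true (h i (List.mem_range.mp hi))

-- Feasibility is downward closed (orders list sorted).
theorem feas_mono (os ss : List Int) (hos : os.Pairwise (· ≤ ·)) (j k : Nat)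
    (hjk : j ≤ k) (hk1 : k ≤ os.length) (hk2 : k ≤ ss.length) (hf : Feas os ss k) :
    Feas os ss j := by
  rw [Feas_iff_getD os ss k hk1 hk2] at hf
  rw [Feas_iff_getD os ss j (by omega) (by omega)]
  intro i hi
  have hi' : i + (k - j) < k := by omega
  have h1 := hf (i + (k - j)) hi'
  have hio : i < os.length := by omega
  have hio' : i + (k - j) < os.length := by omega
  have his : ss.length - j + i = ss.length - k + (i + (k - j)) := by omega
  rw [his]
  refine le_trans ?_ h1
  rw [List.getD_eq_getElem os 0 hio, List.getD_eq_getElem os 0 hio']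
  by_cases heq : j = k
  · have hEq : i + (k - j) = i := by omega
    simp only [hEq]
    exact le_refl _
  · exact (List.pairwise_iff_getElem.mp hos) i (i + (k - j)) hio hio' (by omega)

-- B's binary search finds g when g is feasible, all j ≤ g are feasible, and nothing
-- feasible within bounds exceeds g.
theorem bsearchB_eq (os ss : List Int) (g : Nat)
    (Hb : ∀ j, j ≤ g → feasB os ss ss.length j = true)
    (Hmax : ∀ k, k ≤ min os.length ss.length → feasB os ss ss.length k = true → k ≤ g) :
    ∀ lo hi, lo ≤ g → g ≤ hi → hi ≤ min os.length ss.length →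
      bsearchB os ss ss.length lo hi = g := by
  have key : ∀ d lo hi, hi - lo ≤ d → lo ≤ g → g ≤ hi → hi ≤ min os.length ss.length →
      bsearchB os ss ss.length lo hi = g := by
    intro d
    induction d with
    | zero =>
      intro lo hi hd h1 h2 _
      rw [bsearchB]
      have : ¬ lo < hi := by omega
      simp only [this, dite_false]
      omega
    | succ d IH =>
      intro lo hi hd h1 h2 h3
      rw [bsearchB]
      by_cases hlh : lo < hi
      · simp only [hlh, dite_true]
        by_cases hfe : feasB os ss ss.length ((lo + hi + 1) / 2) = true
        · simp only [hfe, if_true]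
          have hmle : (lo + hi + 1) / 2 ≤ g := Hmax _ (by omega) hfe
          exact IH _ hi (by omega) hmle h2 h3
        · simp only [hfe]
          have hgm : g < (lo + hi + 1) / 2 := by
            by_contra hc
            exact hfe (Hb _ (by omega))
          exact IH lo _ (by omega) h1 (by omega) (by omega)
      · simp only [hlh, dite_false]
        omega
  intro lo hi
  exact key (hi - lo) lo hi le_rfl

-- ===== VERDICT (by name: the statement is the Claim_ definition above) =====
theorem solution_spec : Claim_equal_solution := by
  intro orders orders_list samples samples_list _
  unfold Spec_solution solution solution_alt
  simp only []
  set os := PySem.List.sorted orders_list (fun x => x) false with hos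
  set ss := PySem.List.sorted samples_list (fun x => x) false with hss
  have hpo : os.Pairwise (· ≤ ·) := PySem.List.sorted_pairwise orders_list (fun x => x)
  have hps : ss.Pairwise (· ≤ ·) := PySem.List.sorted_pairwise samples_list (fun x => x)
  have hb := gA_le os ss
  have hfg : Feas os ss (gA os ss) := gA_feas os ss hps
  rw [loopA_eq_gA os ss 0 0 0]
  simp only [List.drop_zero, zero_add]
  have hres : bsearchB os ss ss.length 0 (min os.length ss.length) = gA os ss := by
    apply bsearchB_eq os ss (gA os ss)
    · intro j hj
      rw [feasB_iff os ss j (by omega) (by omega)]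
      exact feas_mono os ss hpo j (gA os ss) hj (by omega) (by omega) hfg
    · intro k hk hfk
      rw [feasB_iff os ss k (by omega) (by omega)] at hfk
      exact feas_le_gA os ss k (by omega) (by omega) hfk
    · omega
    · omega
    · exact le_refl _
  rw [hres]
  simp [Int.ofNat_eq_natCast]
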